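-- pv_equiv track=rewrite | github.com/yougi8/CodingTestStudy | 프로그래머스/pccp_1_3_유전법칙.py | search
-- ===== SOURCE A (Python) =====
-- def search(gen, pos):
--     if gen == 1:
--         return "Rr"
--     parent = search(gen - 1, pos // 4)
--
--     if parent == 'RR':
--         return 'RR'
--     elif parent == 'rr':
--         return 'rr'
--
--     now = pos % 5
--     if parent == 'Rr':
--         if now == 1:
--             return 'RR'
--         elif now == 2 or now == 3:
--             return 'Rr'
--         else:
--             return 'rr'
-- ===== SOURCE B (Python) =====
-- def search(gen, pos):
--     # Iterative: walk generations 2..gen top-down; the digit for generation g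
--     # is (pos // 4**(gen-g)) % 5 (repeated floor-division by 4 collapsed into
--     # one power).  Once the state leaves 'Rr' it is fixed forever.
--     state = "Rr"
--     for g in range(2, gen + 1):
--         if state == "Rr":
--             now = (pos // 4 ** (gen - g)) % 5
--             if now == 1:
--                 state = "RR"
--             elif now == 2 or now == 3:
--                 state = "Rr"
--             else:
--                 state = "rr"
--     return state
-- ===== Notes on version B (the rewrite author's own statement) =====
-- stated objective: alternative
-- what changed: Replaces the top-down recursion (which divides pos by 4 at each unwinding and rebuilds the answer on the way back) by a single forward loop over generations 2..gen that extracts each generation's digit directly as (pos // 4**(gen-g)) % 5 and updates an accumulator state, with no recursion.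
import Mathlib
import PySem

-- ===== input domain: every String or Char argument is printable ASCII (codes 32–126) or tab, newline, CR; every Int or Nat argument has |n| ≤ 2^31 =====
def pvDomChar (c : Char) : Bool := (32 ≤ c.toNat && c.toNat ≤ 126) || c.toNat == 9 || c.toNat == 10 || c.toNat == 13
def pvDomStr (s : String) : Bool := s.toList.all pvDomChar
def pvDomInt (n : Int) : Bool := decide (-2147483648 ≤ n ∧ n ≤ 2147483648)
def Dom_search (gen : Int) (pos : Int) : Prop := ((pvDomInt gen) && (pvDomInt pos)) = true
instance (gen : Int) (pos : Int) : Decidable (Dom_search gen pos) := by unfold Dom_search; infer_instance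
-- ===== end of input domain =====

-- B replaces A's top-down recursion by a forward loop over generations extracting each
-- digit as (pos // 4**(gen-g)) % 5; same values everywhere A returns (objective: alternative).

-- ===== PORT A =====
-- A recurses on gen, decreasing by 1; realized by structural recursion on the fuel
-- gen.toNat (identical to A for every gen ≥ 1; gen ≤ 0 is outside Pre_search).
def searchGo : Nat → Int → String
  | 0, _ => "Rr"          -- unreachable under Pre_search (gen ≤ 0: A recurses forever)
  | 1, _ => "Rr"
  | n + 2, pos =>
    let parent := searchGo (n + 1) (PySem.Int.floordiv pos 4)
    if parent = "RR" then "RR"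
    else if parent = "rr" then "rr"
    else
      let now := PySem.Int.mod pos 5
      if parent = "Rr" then
        if now = 1 then "RR"
        else if now = 2 ∨ now = 3 then "Rr"
        else "rr"
      else ""             -- Python falls off the end (None); unreachable: parent ∈ {RR,rr,Rr}

def search (gen : Int) (pos : Int) : String := searchGo gen.toNat pos

-- ===== PORT B =====
-- (4 : Int) ^ (gen - g).toNat is exact for 4 ** (gen - g): in the loop g ≤ gen, so gen - g ≥ 0.
def searchStep (gen : Int) (pos : Int) (state : String) (g : Int) : String :=
  if state = "Rr" then
    let now := PySem.Int.mod (PySem.Int.floordiv pos ((4 : Int) ^ (gen - g).toNat)) 5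
    if now = 1 then "RR"
    else if now = 2 ∨ now = 3 then "Rr"
    else "rr"
  else state

def search_alt (gen : Int) (pos : Int) : String :=
  (PySem.List.pyRange 2 (gen + 1) 1).foldl (searchStep gen pos) "Rr"

-- ===== PRECONDITION & SPEC =====
-- Pre_ excludes exactly gen ≤ 0, where A never returns: the recursion gen-1, gen-2, …
-- never reaches the gen == 1 base case (RecursionError).
def Pre_search (gen : Int) (pos : Int) : Prop := 1 ≤ gen
instance (gen : Int) (pos : Int) : Decidable (Pre_search gen pos) := by unfold Pre_search; infer_instance
def pvWitness_search : Int × Int := (3, 7)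

def Spec_search (gen : Int) (pos : Int) (out : String) : Prop := out = search_alt gen pos
instance (gen : Int) (pos : Int) (out : String) : Decidable (Spec_search gen pos out) := by unfold Spec_search; infer_instance

-- ===== CLAIM (what is proved, stated in full; the proofs are below) =====
def Claim_equal_search : Prop := ∀ (gen : Int) (pos : Int), Dom_search gen pos → Pre_search gen pos → Spec_search gen pos (search gen pos)

-- ===== LEMMAS AND PROOFS =====

-- A's result is always one of the three genotype strings.
theorem searchGo_mem (n : Nat) : ∀ pos : Int,
    searchGo n pos = "RR" ∨ searchGo n pos = "rr" ∨ searchGo n pos = "Rr" := by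
  induction n with
  | zero => intro pos; simp [searchGo]
  | succ m ih =>
    intro pos
    cases m with
    | zero => simp [searchGo]
    | succ k =>
      have h := ih (PySem.Int.floordiv pos 4)
      simp only [searchGo]
      rcases h with h | h | h <;> rw [h] <;> split_ifs <;> simp_all

-- collapsing two floor divisions: (pos // 4) // 4^k = pos // 4^(k+1)
theorem floordiv_four_pow (pos : Int) (k : Nat) :
    PySem.Int.floordiv (PySem.Int.floordiv pos 4) ((4:Int) ^ k) =
      PySem.Int.floordiv pos ((4:Int) ^ (k + 1)) := by
  rw [PySem.Int.floordiv_eq_ediv_of_pos (by norm_num : (0:Int) < 4),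
      PySem.Int.floordiv_eq_ediv_of_pos (by positivity),
      PySem.Int.floordiv_eq_ediv_of_pos (by positivity),
      Int.ediv_ediv_of_nonneg (by norm_num : (0:Int) ≤ 4)]
  ring_nf

-- one B-step with exponent shifted by one equals the step for pos // 4
theorem searchStep_shift (k : Nat) (pos : Int) (s : String) (g : Int)
    (hg : g ≤ (k : Int) + 1) :
    searchStep ((k : Int) + 2) pos s g = searchStep ((k : Int) + 1) (PySem.Int.floordiv pos 4) s g := by
  unfold searchStep
  have he : (((k : Int) + 2) - g).toNat = (((k : Int) + 1) - g).toNat + 1 := by omega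
  rw [he, ← floordiv_four_pow]

-- main invariant: for n ≥ 1, A's recursion equals B's fold with gen = n
theorem searchGo_eq_fold (n : Nat) : 1 ≤ n → ∀ pos : Int,
    searchGo n pos =
      (PySem.List.pyRange 2 ((n : Int) + 1) 1).foldl (searchStep (n : Int) pos) "Rr" := by
  induction n with
  | zero => omega
  | succ m ih =>
    intro _ pos
    cases m with
    | zero =>
      rw [PySem.List.pyRange_one_eq_nil (by norm_num)]
      simp [searchGo]
    | succ k =>
      have hsplit : PySem.List.pyRange 2 (((k + 2 : Nat) : Int) + 1) 1
          = PySem.List.pyRange 2 (((k : Int) + 2)) 1 ++ [(k : Int) + 2] := by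
        have h := PySem.List.pyRange_one_succ_right (a := 2) (b := (k : Int) + 2) (by omega)
        have hc : ((k + 2 : Nat) : Int) + 1 = ((k : Int) + 2) + 1 := by push_cast; ring
        rw [hc, h]
      rw [hsplit, List.foldl_append]
      have hcongr : (PySem.List.pyRange 2 ((k : Int) + 2) 1).foldl
            (searchStep (((k + 2 : Nat) : Int)) pos) "Rr"
          = (PySem.List.pyRange 2 ((k : Int) + 2) 1).foldl
            (searchStep ((k : Int) + 1) (PySem.Int.floordiv pos 4)) "Rr" := by
        apply PySem.List.foldl_congr_mem
        intro acc g hg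
        rw [PySem.List.mem_pyRange_one] at hg
        have : ((k + 2 : Nat) : Int) = (k : Int) + 2 := by push_cast; ring
        rw [this]
        exact searchStep_shift k pos acc g (by omega)
      rw [hcongr]
      have hpref : (PySem.List.pyRange 2 ((k : Int) + 2) 1).foldl
            (searchStep ((k : Int) + 1) (PySem.Int.floordiv pos 4)) "Rr"
          = searchGo (k + 1) (PySem.Int.floordiv pos 4) := by
        have h := ih (by omega) (PySem.Int.floordiv pos 4)
        have hc1 : ((k + 1 : Nat) : Int) = (k : Int) + 1 := by push_cast; ring
        rw [hc1] at h
        have hc2 : (k : Int) + 1 + 1 = (k : Int) + 2 := by ring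
        rw [hc2] at h
        exact h.symm
      rw [hpref]
      simp only [List.foldl_cons, List.foldl_nil]
      -- final step: exponent 0, now = pos % 5
      have hlast : ∀ s : String, searchStep (((k + 2 : Nat) : Int)) pos s ((k : Int) + 2)
          = if s = "Rr" then
              (if PySem.Int.mod pos 5 = 1 then "RR"
               else if PySem.Int.mod pos 5 = 2 ∨ PySem.Int.mod pos 5 = 3 then "Rr"
               else "rr")
            else s := by
        intro s
        unfold searchStep
        have : ((((k + 2 : Nat) : Int)) - ((k : Int) + 2)).toNat = 0 := by omega
        rw [this]
        simp [PySem.Int.floordiv]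
      have hc : ((k + 1 + 1 : Nat) : Int) = ((k + 2 : Nat) : Int) := by push_cast; ring
      rw [hc, hlast]
      rcases searchGo_mem (k + 1) (PySem.Int.floordiv pos 4) with h | h | h <;>
        (simp only [searchGo]; rw [h]; simp)

-- ===== VERDICT (by name: the statement is the Claim_ definition above) =====
theorem search_spec : Claim_equal_search := by
  intro gen pos _ hpre
  unfold Spec_search search search_alt
  have h1 : (1:Nat) ≤ gen.toNat := by
    unfold Pre_search at hpre; omega
  have h2 : (gen.toNat : Int) = gen := by
    unfold Pre_search at hpre; omega
  rw [searchGo_eq_fold gen.toNat h1 pos, h2]
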